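-- pv_equiv track=rewrite | github.com/Angelou-cious/python_notes | 3.Python Loop Exercise/22_digit_extremes.py | high_low
-- ===== SOURCE A (Python) =====
-- def high_low(num):
--     # Convert negative numbers to positive using absolute value
--     num = abs(num)
--
--     # Special case: if number is 0, return 0 for both high and low
--     if num == 0:
--         return 0,0
--
--     # Get the rightmost digit of the number
--     first_digit = num % 10
--
--     # Initialize both high and low with the first digit
--     high = first_digit
--     low = first_digit
--
--     # Continue loop until all digits are processed (num becomes 0)
--     while num != 0:
--         # Get the rightmost digit using modulo
--         remainder = num % 10
--
--         # Update high if current digit is larger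
--         if remainder > high:
--             high = remainder
--         # Update low if current digit is smaller
--         if remainder < low:
--             low = remainder
--
--         # Remove the rightmost digit by integer division
--         num = num // 10
--
--     # Return the highest and lowest digits found
--     return high, low
-- ===== SOURCE B (Python) =====
-- def high_low(num):
--     # Highest and lowest decimal digit of |num|: decimal string, built-in max/min.
--     digits = [ord(c) - 48 for c in str(abs(num))]
--     return max(digits), min(digits)
-- ===== Notes on version B (the rewrite author's own statement) =====
-- stated objective: idiomatic
-- what changed: Replaces the arithmetic modulo/floor-division loop with running min/max branches by converting the absolute value to its decimal string, mapping characters to digit values, and returning built-in max/min of that list.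
import Mathlib
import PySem

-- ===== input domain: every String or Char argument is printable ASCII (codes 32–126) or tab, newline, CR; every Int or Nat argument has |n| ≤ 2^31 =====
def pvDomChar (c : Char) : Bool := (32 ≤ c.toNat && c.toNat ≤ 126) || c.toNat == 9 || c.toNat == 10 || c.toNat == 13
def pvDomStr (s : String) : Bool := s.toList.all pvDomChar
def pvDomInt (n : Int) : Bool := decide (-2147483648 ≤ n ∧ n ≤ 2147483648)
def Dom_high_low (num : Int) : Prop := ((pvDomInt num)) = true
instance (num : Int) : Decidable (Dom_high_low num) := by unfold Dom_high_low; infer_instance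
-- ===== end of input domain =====

-- B replaces A's modulo/floor-division running-min/max loop by the decimal string of |num|,
-- a digit-value list and built-in max/min (idiomatic; same cost).


-- ===== PORT A =====
-- The while loop: the loop variable is |num|, a nonnegative integer, tracked as a Nat
-- (Python's % and // on nonnegative ints agree exactly with Nat.mod / Nat.div).
def high_low_go (num : Nat) (high low : Int) : Int × Int :=
  if h : num = 0 then (high, low)
  else
    let remainder : Int := ((num % 10 : Nat) : Int)
    let high' := if remainder > high then remainder else high
    let low' := if remainder < low then remainder else low
    high_low_go (num / 10) high' low'
termination_by num
decreasing_by exact Nat.div_lt_self (Nat.pos_of_ne_zero h) (by norm_num)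

def high_low (num : Int) : Int × Int :=
  if num.natAbs = 0 then (0, 0)   -- num = abs(num); if num == 0: return 0,0
  else
    let first_digit : Int := ((num.natAbs % 10 : Nat) : Int)
    high_low_go num.natAbs first_digit first_digit

-- ===== PORT B =====
def high_low_alt (num : Int) : Int × Int :=
  let digits := (PySem.Int.toChars |num|).map (fun c => ((c.toNat : Int) - 48))
  match PySem.List.max? digits (fun x => x), PySem.List.min? digits (fun x => x) with
  | some h, some l => (h, l)
  | _, _ => (0, 0)  -- unreachable: str(abs(num)) is never empty, so Python's max/min never raise

-- ===== PRECONDITION & SPEC =====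
def Spec_high_low (num : Int) (out : Int × Int) : Prop := out = high_low_alt num
instance (num : Int) (out : Int × Int) : Decidable (Spec_high_low num out) := by unfold Spec_high_low; infer_instance

-- ===== CLAIM (what is proved, stated in full; the proofs are below) =====
def Claim_equal_high_low : Prop := ∀ (num : Int), Dom_high_low num → Spec_high_low num (high_low num)

-- ===== LEMMAS AND PROOFS =====

-- the little-endian decimal digits of n, as integers
def digsI (n : Nat) : List Int := (Nat.digits 10 n).map (fun (d : Nat) => (d : Int))

theorem digsI_cons (n : Nat) (hn : n ≠ 0) :
    digsI n = ((n % 10 : Nat) : Int) :: digsI (n / 10) := by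
  unfold digsI
  rw [Nat.digits_def' (by norm_num : (1:Nat) < 10) (Nat.pos_of_ne_zero hn), List.map_cons]

theorem if_max (h r : Int) : (if r > h then r else h) = max h r := by
  simp only [max_def]; split_ifs <;> omega

theorem if_min (l r : Int) : (if r < l then r else l) = min l r := by
  simp only [min_def]; split_ifs <;> omega

theorem foldl_max_mem : ∀ (t : List Int) (x : Int), t.foldl max x ∈ x :: t := by
  intro t
  induction t with
  | nil => simp
  | cons a t ih =>
    intro x
    have h := ih (max x a)
    rw [List.foldl_cons]
    rcases List.mem_cons.1 h with h' | h'
    · rw [h']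
      rcases max_choice x a with hc | hc <;> rw [hc] <;> simp
    · simp [h']

theorem foldl_min_mem : ∀ (t : List Int) (x : Int), t.foldl min x ∈ x :: t := by
  intro t
  induction t with
  | nil => simp
  | cons a t ih =>
    intro x
    have h := ih (min x a)
    rw [List.foldl_cons]
    rcases List.mem_cons.1 h with h' | h'
    · rw [h']
      rcases min_choice x a with hc | hc <;> rw [hc] <;> simp
    · simp [h']

theorem foldl_max_le : ∀ (t : List Int) (x y : Int), y ∈ x :: t → y ≤ t.foldl max x := by
  intro t
  induction t with
  | nil => intro x y hy; simp at hy; simp [hy]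
  | cons a t ih =>
    intro x y hy
    have hxa : max x a ≤ t.foldl max (max x a) := ih (max x a) (max x a) (by simp)
    rw [List.foldl_cons]
    rcases List.mem_cons.1 hy with h' | h'
    · rw [h']; exact le_trans (le_max_left x a) hxa
    · rcases List.mem_cons.1 h' with h'' | h''
      · rw [h'']; exact le_trans (le_max_right x a) hxa
      · exact ih (max x a) y (List.mem_cons_of_mem _ h'')

theorem foldl_min_ge : ∀ (t : List Int) (x y : Int), y ∈ x :: t → t.foldl min x ≤ y := by
  intro t
  induction t with
  | nil => intro x y hy; simp at hy; simp [hy]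
  | cons a t ih =>
    intro x y hy
    have hxa : t.foldl min (min x a) ≤ min x a := ih (min x a) (min x a) (by simp)
    rw [List.foldl_cons]
    rcases List.mem_cons.1 hy with h' | h'
    · rw [h']; exact le_trans hxa (min_le_left x a)
    · rcases List.mem_cons.1 h' with h'' | h''
      · rw [h'']; exact le_trans hxa (min_le_right x a)
      · exact ih (min x a) y (List.mem_cons_of_mem _ h'')

theorem foldl_max_congr (x y : Int) (t s : List Int)
    (h : ∀ z, z ∈ x :: t ↔ z ∈ y :: s) : t.foldl max x = s.foldl max y :=
  le_antisymm (foldl_max_le s y _ ((h _).1 (foldl_max_mem t x)))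
    (foldl_max_le t x _ ((h _).2 (foldl_max_mem s y)))

theorem foldl_min_congr (x y : Int) (t s : List Int)
    (h : ∀ z, z ∈ x :: t ↔ z ∈ y :: s) : t.foldl min x = s.foldl min y :=
  le_antisymm (foldl_min_ge t x _ ((h _).2 (foldl_min_mem s y)))
    (foldl_min_ge s y _ ((h _).1 (foldl_min_mem t x)))

-- A's loop computes the running max/min over the little-endian decimal digits.
theorem go_eq (n : Nat) : ∀ (h l : Int),
    high_low_go n h l = ((digsI n).foldl max h, (digsI n).foldl min l) := by
  induction n using Nat.strong_induction_on with
  | _ n ih =>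
    intro h l
    rw [high_low_go]
    by_cases hn : n = 0
    · simp [hn, digsI]
    · rw [dif_neg hn, ih (n / 10) (Nat.div_lt_self (Nat.pos_of_ne_zero hn) (by norm_num)),
        digsI_cons n hn]
      simp only [List.foldl_cons, if_max, if_min]

-- Core's `Nat.toDigits` is the reversed digit-character list (for n ≠ 0).
theorem toDigitsCore_eq : ∀ (fuel n : Nat) (ds : List Char), n < fuel → 0 < n →
    Nat.toDigitsCore 10 fuel n ds = ((Nat.digits 10 n).map Nat.digitChar).reverse ++ ds := by
  intro fuel
  induction fuel with
  | zero => intro n ds hf; omega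
  | succ f ih =>
    intro n ds hf hn
    show (let d := (n % 10).digitChar
          let n' := n / 10
          if n' = 0 then d :: ds else Nat.toDigitsCore 10 f n' (d :: ds)) = _
    rw [Nat.digits_def' (by norm_num : (1:Nat) < 10) hn]
    by_cases h10 : n / 10 = 0
    · simp [h10]
    · have hlt : n / 10 < f := lt_of_lt_of_le (Nat.div_lt_self hn (by norm_num)) (by omega)
      simp only [h10, ih (n / 10) _ hlt (Nat.pos_of_ne_zero h10)]
      simp

theorem toDigits_eq (n : Nat) (hn : n ≠ 0) :
    Nat.toDigits 10 n = ((Nat.digits 10 n).map Nat.digitChar).reverse := by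
  have := toDigitsCore_eq (n + 1) n [] (Nat.lt_succ_self n) (Nat.pos_of_ne_zero hn)
  simpa [Nat.toDigits] using this

theorem digitChar_val (d : Nat) (hd : d < 10) :
    ((Nat.digitChar d).toNat : Int) - 48 = (d : Int) := by
  interval_cases d <;> decide

theorem mapB_eq (n : Nat) (hn : n ≠ 0) :
    (Nat.toDigits 10 n).map (fun c => ((c.toNat : Int) - 48)) = (digsI n).reverse := by
  rw [toDigits_eq n hn, List.map_reverse, List.map_map]
  unfold digsI
  congr 1
  apply List.map_congr_left
  intro d hd
  exact digitChar_val d (Nat.digits_lt_base (by norm_num) hd)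

-- the whole equivalence, over the nonnegative loop variable n = |num|
theorem key (n : Nat) :
    (if n = 0 then ((0:Int), (0:Int)) else high_low_go n ((n % 10 : Nat) : Int) ((n % 10 : Nat) : Int))
    = (match PySem.List.max? ((Nat.toDigits 10 n).map (fun c => ((c.toNat : Int) - 48))) (fun x => x),
             PySem.List.min? ((Nat.toDigits 10 n).map (fun c => ((c.toNat : Int) - 48))) (fun x => x) with
       | some h, some l => (h, l)
       | _, _ => ((0:Int), (0:Int))) := by
  by_cases h0 : n = 0
  · subst h0; decide
  · rw [if_neg h0, mapB_eq n h0, go_eq n, digsI_cons n h0]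
    obtain ⟨e, s, hes⟩ : ∃ e s, (digsI n).reverse = e :: s := by
      rcases hrev : (digsI n).reverse with _ | ⟨e, s⟩
      · exfalso
        have : digsI n = [] := by simpa using congrArg List.reverse hrev
        rw [digsI_cons n h0] at this; simp at this
      · exact ⟨e, s, rfl⟩
    rw [digsI_cons n h0] at hes
    rw [hes]
    simp only [PySem.List.max?_id_cons, PySem.List.min?_id_cons]
    have hmem : ∀ z, z ∈ ((n % 10 : Nat) : Int) :: digsI (n / 10) ↔ z ∈ e :: s := by
      intro z
      rw [← hes, List.mem_reverse]
    simp only [List.foldl_cons, max_self, min_self]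
    exact Prod.ext (foldl_max_congr _ e _ s hmem) (foldl_min_congr _ e _ s hmem)

-- ===== VERDICT (by name: the statement is the Claim_ definition above) =====
theorem high_low_spec : Claim_equal_high_low := by
  intro num _
  unfold Spec_high_low high_low high_low_alt
  have habs : |num| = ((num.natAbs : Nat) : Int) := Int.abs_eq_natAbs num
  rw [habs]
  have htoc : PySem.Int.toChars ((num.natAbs : Nat) : Int) = Nat.toDigits 10 num.natAbs := by
    unfold PySem.Int.toChars
    rw [if_neg (by omega), Int.toNat_natCast]
  rw [htoc]
  exact key num.natAbs
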